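-- pv_equiv track=rewrite | github.com/ChupaSOLANA/incognito-protocol | services/api/cli_adapter.py | _parse_ata_from_verbose
-- ===== SOURCE A (Python) =====
-- class CLIAdapterError(RuntimeError):
--     """Raised when a commanded CLI operation fails in a recoverable/expected way."""
--
-- def _parse_ata_from_verbose(out: str) -> str:
--     """
--     Parse ATA from `spl-token address --verbose` output.
--     Fallback: return the first non-empty line if no explicit label found.
--     """
--     for line in out.splitlines():
--         if line.strip().lower().startswith("associated token address:"):
--             return line.split(":", 1)[1].strip()
--     # fallback: return first non-empty line
--     for line in out.splitlines():
--         s = line.strip()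
--         if s:
--             return s
--     raise CLIAdapterError(f"Unable to parse ATA from output:\n{out}")
-- ===== SOURCE B (Python) =====
-- class CLIAdapterError(RuntimeError):
--     """Raised when a commanded CLI operation fails in a recoverable/expected way."""
--
-- def _parse_ata_from_verbose(out: str) -> str:
--     first = None
--     for line in out.splitlines():
--         s = line.strip()
--         if s.lower().startswith("associated token address:"):
--             return line.split(":", 1)[1].strip()
--         if first is None and s:
--             first = s
--     if first is not None:
--         return first
--     raise CLIAdapterError(f"Unable to parse ATA from output:\n{out}")
-- ===== Notes on version B (the rewrite author's own statement) =====
-- stated objective: simpler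
-- what changed: Replaces A's two sequential scans of out.splitlines() (label scan, then fallback scan) with a single pass that returns on the label immediately and remembers the first non-empty stripped line as it goes.
import Mathlib
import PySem

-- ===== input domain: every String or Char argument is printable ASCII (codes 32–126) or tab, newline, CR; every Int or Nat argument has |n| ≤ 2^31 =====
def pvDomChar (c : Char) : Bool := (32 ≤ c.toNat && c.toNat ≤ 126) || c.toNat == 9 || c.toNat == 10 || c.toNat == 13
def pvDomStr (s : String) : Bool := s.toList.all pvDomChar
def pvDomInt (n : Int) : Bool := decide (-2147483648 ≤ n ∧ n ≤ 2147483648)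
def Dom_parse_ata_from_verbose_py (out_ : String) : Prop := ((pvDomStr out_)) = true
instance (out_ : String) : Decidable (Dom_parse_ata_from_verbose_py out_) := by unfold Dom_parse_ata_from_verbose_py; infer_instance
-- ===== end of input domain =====

-- B merges A's two sequential scans over the lines into one pass that remembers the
-- first non-empty stripped line; equivalence proved on inputs where A returns (Pre_).

-- ===== PORT A =====
-- first loop of A: scan for a line labelled "associated token address:";
-- `line.split(":", 1)[1]` is in range whenever the branch fires (the label contains ':'),
-- ported as getD 1 "" guarded by that branch.
def pvFindLabelA : List String → Option String
  | [] => none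
  | line :: rest =>
    if PySem.Str.startswith (PySem.Str.lower (PySem.Str.strip line)) "associated token address:" then
      some (PySem.Str.strip (((PySem.Str.splitMax? line ":" 1).getD []).getD 1 ""))
    else pvFindLabelA rest

-- second loop of A: first line whose strip is non-empty
def pvFirstNonemptyA : List String → Option String
  | [] => none
  | line :: rest =>
    let s := PySem.Str.strip line
    if s ≠ "" then some s else pvFirstNonemptyA rest

def parse_ata_from_verbose_py (out_ : String) : String :=
  match pvFindLabelA (PySem.Str.splitlines out_) with
  | some r => r
  | none =>
    match pvFirstNonemptyA (PySem.Str.splitlines out_) with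
    | some s => s
    | none => ""  -- raise CLIAdapterError: excluded by Pre_

-- ===== PORT B =====
-- single pass with the first-non-empty holder as accumulator
def pvGoB : List String → Option String → String
  | [], first => first.getD ""  -- none = raise CLIAdapterError: excluded by Pre_
  | line :: rest, first =>
    let s := PySem.Str.strip line
    if PySem.Str.startswith (PySem.Str.lower s) "associated token address:" then
      PySem.Str.strip (((PySem.Str.splitMax? line ":" 1).getD []).getD 1 "")
    else
      pvGoB rest (if first.isNone && s ≠ "" then some s else first)

def parse_ata_from_verbose_py_alt (out_ : String) : String :=
  pvGoB (PySem.Str.splitlines out_) none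

-- ===== PRECONDITION & SPEC =====
-- Pre_ excludes exactly the inputs where every line strips to "": there both Pythons raise CLIAdapterError.
def Pre_parse_ata_from_verbose_py (out_ : String) : Prop :=
  (PySem.Str.splitlines out_).any (fun l => PySem.Str.strip l ≠ "")
instance (out_ : String) : Decidable (Pre_parse_ata_from_verbose_py out_) := by
  unfold Pre_parse_ata_from_verbose_py; infer_instance

def pvWitness_parse_ata_from_verbose_py : String := "Associated Token Address: ABC"

def Spec_parse_ata_from_verbose_py (out_ : String) (out : String) : Prop :=
  out = parse_ata_from_verbose_py_alt out_
instance (out_ : String) (out : String) : Decidable (Spec_parse_ata_from_verbose_py out_ out) := by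
  unfold Spec_parse_ata_from_verbose_py; infer_instance

-- ===== CLAIM (what is proved, stated in full; the proofs are below) =====
def Claim_equal_parse_ata_from_verbose_py : Prop :=
  ∀ (out_ : String), Dom_parse_ata_from_verbose_py out_ →
    Pre_parse_ata_from_verbose_py out_ →
    Spec_parse_ata_from_verbose_py out_ (parse_ata_from_verbose_py out_)

-- ===== LEMMAS AND PROOFS =====
theorem pvGoB_eq (ls : List String) (first : Option String) :
    pvGoB ls first =
      match pvFindLabelA ls with
      | some r => r
      | none =>
        match first with
        | some f => f
        | none => (pvFirstNonemptyA ls).getD "" := by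
  induction ls generalizing first with
  | nil => cases first <;> simp [pvGoB, pvFindLabelA, pvFirstNonemptyA]
  | cons line rest ih =>
    simp only [pvGoB, pvFindLabelA]
    split_ifs with hlab h2
    · rfl
    · rw [ih]
      have hf : first = none := by cases first <;> simp_all
      have hs : PySem.Str.strip line ≠ "" := by simp_all
      subst hf
      cases hfl : pvFindLabelA rest <;> simp [pvFirstNonemptyA, hs]
    · rw [ih]
      cases first with
      | some f => cases hfl : pvFindLabelA rest <;> simp
      | none =>
        have hs : PySem.Str.strip line = "" := by simp_all
        cases hfl : pvFindLabelA rest <;> simp [pvFirstNonemptyA, hs]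

theorem pvWitness_ok :
    Dom_parse_ata_from_verbose_py pvWitness_parse_ata_from_verbose_py ∧
      Pre_parse_ata_from_verbose_py pvWitness_parse_ata_from_verbose_py := by
  decide

-- ===== VERDICT (by name: the statement is the Claim_ definition above) =====
theorem parse_ata_from_verbose_py_spec : Claim_equal_parse_ata_from_verbose_py := by
  intro out_ _ _
  unfold Spec_parse_ata_from_verbose_py parse_ata_from_verbose_py parse_ata_from_verbose_py_alt
  rw [pvGoB_eq]
  cases pvFindLabelA (PySem.Str.splitlines out_) with
  | some r => rfl
  | none => cases pvFirstNonemptyA (PySem.Str.splitlines out_) <;> rfl
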